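-- pv_equiv track=rewrite | github.com/taveg25/finish | get.py | check_equals
-- ===== SOURCE A (Python) =====
-- def check_equals(people):
--     iterator = iter(people)
--     x = next(iterator)
--     r1 = x[0]
--     for y in iterator:
--         r2 = y[0]
--         if r1 == r2:
--             return False
--         r1 = r2
--     return True
-- ===== SOURCE B (Python) =====
-- def check_equals(people):
--     firsts = [p[0] for p in people]
--     dedup = []
--     for v in firsts:
--         if not dedup or dedup[-1] != v:
--             dedup.append(v)
--     return len(dedup) == len(firsts)
-- ===== Notes on version B (the rewrite author's own statement) =====
-- stated objective: alternative
-- what changed: B run-length-compresses the list of first components (keeping each value only when it differs from the last kept one) and answers by comparing the compressed length with the original length, instead of A's early-exit scan threading a running 'previous' variable; correct because the compression drops exactly the elements equal to their immediate predecessor.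
-- outside the precondition, e.g. on check_equals([[1], [1], []]): A returns False, B raises IndexError
import Mathlib
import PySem

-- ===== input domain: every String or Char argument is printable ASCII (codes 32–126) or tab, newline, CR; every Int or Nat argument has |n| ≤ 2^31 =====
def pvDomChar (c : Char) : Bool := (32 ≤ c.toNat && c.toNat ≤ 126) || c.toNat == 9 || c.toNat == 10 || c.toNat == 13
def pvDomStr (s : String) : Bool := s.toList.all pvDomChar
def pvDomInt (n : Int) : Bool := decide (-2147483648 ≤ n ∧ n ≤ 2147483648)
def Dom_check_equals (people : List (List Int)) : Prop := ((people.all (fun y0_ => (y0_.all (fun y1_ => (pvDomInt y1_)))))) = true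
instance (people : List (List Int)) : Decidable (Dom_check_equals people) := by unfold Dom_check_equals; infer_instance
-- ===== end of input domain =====

-- B run-length-compresses the list of first components and compares the compressed
-- length with the original length, instead of A's early-exit scan carrying 'previous'
-- (alternative decomposition, same cost).


-- ===== PORT A =====
-- the for-loop over the rest of the iterator, carrying r1
def checkLoop (r1 : Int) : List (List Int) → Bool
  | [] => true
  | y :: ys =>
    let r2 := y.headD 0   -- y[0]; inner lists are nonempty under Pre_
    if r1 == r2 then false else checkLoop r2 ys

def check_equals (people : List (List Int)) : Bool :=
  match people with
  | [] => true            -- unreachable: Python raises StopIteration, excluded by Pre_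
  | x :: it => checkLoop (x.headD 0) it

-- ===== PORT B =====
-- one step of B's loop: append v unless it equals the last kept element
def dedupStep (acc : List Int) (v : Int) : List Int :=
  if acc = [] ∨ acc.getLast? ≠ some v then acc ++ [v] else acc

def check_equals_alt (people : List (List Int)) : Bool :=
  let firsts := people.map (fun p => p.headD 0)
  let dedup := firsts.foldl dedupStep []
  dedup.length == firsts.length

-- ===== PRECONDITION & SPEC =====
-- Pre_ excludes the empty list (where A raises StopIteration) and inputs containing an
-- empty inner list: B's first pass always raises IndexError there, while A usually
-- raises IndexError too but may return False early before reaching it.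
def Pre_check_equals (people : List (List Int)) : Prop :=
  people ≠ [] ∧ ∀ p ∈ people, p ≠ []
instance (people : List (List Int)) : Decidable (Pre_check_equals people) := by
  unfold Pre_check_equals; infer_instance
def pvWitness_check_equals : List (List Int) := [[1, 2], [3], [1]]

def Spec_check_equals (people : List (List Int)) (out : Bool) : Prop := out = check_equals_alt people
instance (people : List (List Int)) (out : Bool) : Decidable (Spec_check_equals people out) := by unfold Spec_check_equals; infer_instance

-- ===== CLAIM (what is proved, stated in full; the proofs are below) =====
def Claim_equal_check_equals : Prop := ∀ (people : List (List Int)), Dom_check_equals people → Pre_check_equals people → Spec_check_equals people (check_equals people)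

-- ===== LEMMAS AND PROOFS =====
-- A's loop over rows reduced to a loop over the first components
def loopF (r1 : Int) : List Int → Bool
  | [] => true
  | v :: vs => if r1 == v then false else loopF v vs

theorem checkLoop_eq_loopF (ys : List (List Int)) : ∀ r1,
    checkLoop r1 ys = loopF r1 (ys.map (fun y => y.headD 0)) := by
  induction ys with
  | nil => intro r1; rfl
  | cons y ys ih =>
    intro r1
    simp only [checkLoop, loopF, List.map_cons]
    split_ifs <;> simp [ih]

theorem dedup_length_le (vs : List Int) : ∀ acc,
    (vs.foldl dedupStep acc).length ≤ acc.length + vs.length := by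
  induction vs with
  | nil => intro acc; simp
  | cons v vs ih =>
    intro acc
    simp only [List.foldl_cons]
    refine le_trans (ih _) ?_
    unfold dedupStep
    split_ifs <;> simp <;> omega

theorem dedup_main (vs : List Int) : ∀ (acc : List Int) (l : Int),
    acc.getLast? = some l →
    (((vs.foldl dedupStep acc).length = acc.length + vs.length) ↔ loopF l vs = true) := by
  induction vs with
  | nil => intro acc l _; simp [loopF]
  | cons v vs ih =>
    intro acc l hl
    have hne : acc ≠ [] := by intro h; simp [h] at hl
    simp only [List.foldl_cons, loopF]
    by_cases hlv : l = v
    · have hl' : acc.getLast? = some v := by rw [hl, hlv]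
      have hstep : dedupStep acc v = acc := by
        unfold dedupStep
        rw [if_neg]
        rintro (h | h)
        · exact hne h
        · exact h hl'
      rw [hstep, if_pos (show (l == v) = true by simp [hlv])]
      have hle := dedup_length_le vs acc
      constructor
      · intro h; simp only [List.length_cons] at h; omega
      · intro h; simp at h
    · have hstep : dedupStep acc v = acc ++ [v] := by
        unfold dedupStep
        rw [if_pos]
        right; rw [hl]; simp [hlv]
      rw [hstep, if_neg (by simpa using hlv)]
      have harith : acc.length + (v :: vs).length = (acc ++ [v]).length + vs.length := by
        simp only [List.length_append, List.length_cons, List.length_nil]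
        omega
      rw [harith]
      exact ih (acc ++ [v]) v (by simp)

-- ===== VERDICT (by name: the statement is the Claim_ definition above) =====
theorem check_equals_spec : Claim_equal_check_equals := by
  intro people _ hpre
  unfold Spec_check_equals
  match people with
  | [] => exact absurd rfl hpre.1
  | x :: it =>
    show checkLoop (x.headD 0) it = check_equals_alt (x :: it)
    rw [checkLoop_eq_loopF]
    simp only [check_equals_alt, List.map_cons, List.foldl_cons]
    have hstep : dedupStep [] (x.headD 0) = [x.headD 0] := by unfold dedupStep; simp
    rw [hstep]
    have h := dedup_main (it.map (fun y => y.headD 0)) [x.headD 0] (x.headD 0) (by simp)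
    cases hb : loopF (x.headD 0) (it.map (fun y => y.headD 0))
    · symm
      rw [beq_eq_false_iff_ne]
      intro hc
      have h2 := h.mp (by simp only [List.length_cons, List.length_nil] at hc ⊢; omega)
      rw [hb] at h2
      exact absurd h2 (by decide)
    · symm
      rw [beq_iff_eq]
      have h2 := h.mpr hb
      simp only [List.length_cons, List.length_nil] at h2 ⊢
      omega
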